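-- pv_equiv track=rewrite | github.com/PotentialError/MIT-Open-Courseware-6.0001-Psets | hangman.py | number_of_unique_letters
-- ===== SOURCE A (Python) =====
-- import string
--
-- def number_of_unique_letters(secret_word):
--     unique_letters = 0
--     for char in string.ascii_lowercase:
--         for char2 in secret_word:
--             if char == char2:
--                 unique_letters+=1
--                 break
--     return unique_letters
-- ===== SOURCE B (Python) =====
-- import string
--
-- def number_of_unique_letters(secret_word):
--     return len({c for c in secret_word if c in string.ascii_lowercase})
-- ===== Notes on version B (the rewrite author's own statement) =====
-- stated objective: faster
-- what changed: Replaces A's 26-by-n nested scan of the alphabet against the word with a single pass over the word collecting lowercase letters into a set and returning its size.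
import Mathlib
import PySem

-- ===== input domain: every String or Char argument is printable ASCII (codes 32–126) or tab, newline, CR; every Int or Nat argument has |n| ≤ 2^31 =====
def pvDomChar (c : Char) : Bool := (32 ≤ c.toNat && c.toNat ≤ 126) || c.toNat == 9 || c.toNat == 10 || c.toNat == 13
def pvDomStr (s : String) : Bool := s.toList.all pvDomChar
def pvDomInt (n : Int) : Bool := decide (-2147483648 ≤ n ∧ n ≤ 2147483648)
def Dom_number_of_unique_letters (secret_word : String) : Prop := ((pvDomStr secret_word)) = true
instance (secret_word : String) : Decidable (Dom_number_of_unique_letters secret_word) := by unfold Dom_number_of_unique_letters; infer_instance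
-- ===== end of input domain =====

-- B replaces A's alphabet-by-word nested scan with one pass over the word building a set of its lowercase letters (idiomatic).


-- ===== PORT A =====
-- string.ascii_lowercase
def pvAsciiLowercase : List Char := "abcdefghijklmnopqrstuvwxyz".toList

-- inner loop 'for char2 in secret_word: if char == char2: unique_letters += 1; break'
-- ported as a scan that stops at the first match
def pvInnerHit (chars : List Char) (char : Char) : Bool :=
  match chars with
  | [] => false
  | char2 :: rest => if char == char2 then true else pvInnerHit rest char

def number_of_unique_letters (secret_word : String) : Int :=
  pvAsciiLowercase.foldl
    (fun unique_letters char =>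
      if pvInnerHit secret_word.toList char then unique_letters + 1 else unique_letters)
    0

-- ===== PORT B =====
-- {c for c in secret_word if c in string.ascii_lowercase} ; return its len
def number_of_unique_letters_alt (secret_word : String) : Int :=
  (secret_word.toList.foldl
    (fun s c => if pvAsciiLowercase.contains c then PySem.Set.add s c else s)
    (PySem.Set.empty : PySem.Set Char)).length

-- ===== PRECONDITION & SPEC =====
def Spec_number_of_unique_letters (secret_word : String) (out : Int) : Prop := out = number_of_unique_letters_alt secret_word
instance (secret_word : String) (out : Int) : Decidable (Spec_number_of_unique_letters secret_word out) := by unfold Spec_number_of_unique_letters; infer_instance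

-- ===== CLAIM (what is proved, stated in full; the proofs are below) =====
def Claim_equal_number_of_unique_letters : Prop := ∀ (secret_word : String), Dom_number_of_unique_letters secret_word → Spec_number_of_unique_letters secret_word (number_of_unique_letters secret_word)

-- ===== LEMMAS AND PROOFS =====

-- A's inner loop finds a match iff the char is in the word
theorem pvInnerHit_eq_mem (chars : List Char) (c : Char) :
    pvInnerHit chars c = true ↔ c ∈ chars := by
  induction chars with
  | nil => simp [pvInnerHit]
  | cons h t ih =>
    simp [pvInnerHit]
    by_cases hc : c = h
    · simp [hc]
    · simp [hc, ih]

-- A's counting loop counts the alphabet letters occurring in the word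
theorem pvCount_eq_filter_length (l : List Char) (p : Char → Bool) (acc : Int) :
    l.foldl (fun n c => if p c then n + 1 else n) acc = acc + (l.filter p).length := by
  induction l generalizing acc with
  | nil => simp
  | cons h t ih =>
    by_cases hp : p h
    · simp [hp, ih]; omega
    · simp [hp, ih]

-- B's loop builds the set of lowercase characters of the word
theorem pvSet_eq_ofList_filter (l : List Char) :
    l.foldl (fun s c => if pvAsciiLowercase.contains c then PySem.Set.add s c else s)
      (PySem.Set.empty : PySem.Set Char)
      = PySem.Set.ofList (l.filter (fun c => pvAsciiLowercase.contains c)) := by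
  rw [PySem.List.foldl_if_eq_foldl_filter]
  rfl

theorem number_of_unique_letters_spec : Claim_equal_number_of_unique_letters := by
  intro secret_word _
  show number_of_unique_letters secret_word = number_of_unique_letters_alt secret_word
  unfold number_of_unique_letters number_of_unique_letters_alt
  rw [pvSet_eq_ofList_filter]
  rw [pvCount_eq_filter_length]
  have hperm :
      (pvAsciiLowercase.filter (fun char => pvInnerHit secret_word.toList char)).Perm
        (PySem.Set.ofList (secret_word.toList.filter (fun c => pvAsciiLowercase.contains c))) := by
    rw [List.perm_ext_iff_of_nodup]
    · intro x
      simp [List.mem_filter, PySem.Set.mem_ofList, pvInnerHit_eq_mem]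
      tauto
    · exact List.Nodup.filter _ (by decide)
    · exact PySem.Set.nodup_ofList _
  rw [hperm.length_eq]
  simp
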